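-- pv_equiv track=rewrite | github.com/petrlos/AoC_2021 | 12/12.py | smallCaveVisitedMaxOnce
-- ===== SOURCE A (Python) =====
-- def smallCaveVisitedMaxOnce(path):
--     visitedSmallCaves = []
--     for cave in path:
--         if cave.islower():
--             if cave not in visitedSmallCaves:
--                 visitedSmallCaves.append(cave)
--             else:
--                 return False
--     return True
-- ===== SOURCE B (Python) =====
-- def smallCaveVisitedMaxOnce(path):
--     smalls = [cave for cave in path if cave.islower()]
--     return len(smalls) == len(set(smalls))
-- ===== Notes on version B (the rewrite author's own statement) =====
-- stated objective: idiomatic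
-- what changed: Replaces the incremental visited-list scan with an early return by a one-pass filter of lowercase caves followed by a single length-vs-set-size comparison.
import Mathlib
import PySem

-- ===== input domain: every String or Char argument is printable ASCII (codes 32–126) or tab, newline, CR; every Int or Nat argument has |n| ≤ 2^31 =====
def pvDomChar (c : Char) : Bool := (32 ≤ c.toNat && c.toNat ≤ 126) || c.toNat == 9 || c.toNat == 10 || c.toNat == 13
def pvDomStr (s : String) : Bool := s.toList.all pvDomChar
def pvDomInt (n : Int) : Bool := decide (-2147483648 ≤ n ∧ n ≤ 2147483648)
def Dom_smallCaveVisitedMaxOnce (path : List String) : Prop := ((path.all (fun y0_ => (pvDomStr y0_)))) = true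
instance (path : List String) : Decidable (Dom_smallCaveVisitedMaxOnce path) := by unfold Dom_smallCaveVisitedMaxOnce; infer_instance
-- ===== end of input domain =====

-- B replaces A's incremental visited-list scan with early return by filtering the lowercase
-- caves once and comparing the list length with the set size (idiomatic; equal return values).

-- str.islower(), exact on ASCII (the domain): at least one cased character and no cased
-- character uppercase; ASCII cased characters are exactly the letters.
def pyStrIslower (s : String) : Bool :=
  s.toList.any PySem.Chars.islower && !(s.toList.any PySem.Chars.isupper)

-- ===== PORT A =====
def smallCaveGoA : List String → List String → Bool
  | [], _ => true
  | cave :: rest, visited =>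
    if pyStrIslower cave then
      if visited.contains cave = false then
        smallCaveGoA rest (visited ++ [cave])
      else
        false
    else
      smallCaveGoA rest visited

def smallCaveVisitedMaxOnce (path : List String) : Bool := smallCaveGoA path []

-- ===== PORT B =====
def smallCaveVisitedMaxOnce_alt (path : List String) : Bool :=
  let smalls := path.filter pyStrIslower
  smalls.length == (PySem.Set.ofList smalls).length

-- ===== PRECONDITION & SPEC =====
def Spec_smallCaveVisitedMaxOnce (path : List String) (out : Bool) : Prop := out = smallCaveVisitedMaxOnce_alt path
instance (path : List String) (out : Bool) : Decidable (Spec_smallCaveVisitedMaxOnce path out) := by unfold Spec_smallCaveVisitedMaxOnce; infer_instance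

-- ===== CLAIM (what is proved, stated in full; the proofs are below) =====
def Claim_equal_smallCaveVisitedMaxOnce : Prop := ∀ (path : List String), Dom_smallCaveVisitedMaxOnce path → Spec_smallCaveVisitedMaxOnce path (smallCaveVisitedMaxOnce path)

-- ===== LEMMAS AND PROOFS =====
theorem goA_eq_nodup (path : List String) : ∀ (acc : List String), acc.Nodup →
    smallCaveGoA path acc = decide ((acc ++ path.filter pyStrIslower).Nodup) := by
  induction path with
  | nil => intro acc h; simp [smallCaveGoA, h]
  | cons c rest ih =>
    intro acc h
    by_cases hl : pyStrIslower c
    · by_cases hm : c ∈ acc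
      · have hct : acc.contains c = true := by simpa using hm
        have hnot : ¬(acc ++ c :: rest.filter pyStrIslower).Nodup := by
          intro hnd
          rw [List.nodup_append] at hnd
          exact hnd.2.2 c hm c (by simp) rfl
        simp [smallCaveGoA, hl, hm, hnot]
      · have hc : acc.contains c = false := by simpa using hm
        have hnd : (acc ++ [c]).Nodup := by
          refine List.Nodup.append h (List.nodup_singleton c) ?_
          intro a ha hb; simp at hb; subst hb; exact hm ha
        have := ih (acc ++ [c]) hnd
        simp only [smallCaveGoA, hl, hc, if_true, this, List.filter_cons, List.append_assoc,
          List.singleton_append]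
    · simp only [smallCaveGoA, hl, if_false, ih acc h, List.filter_cons,
        Bool.false_eq_true]

theorem foldl_add_len_le (xs : List String) : ∀ (s : List String),
    (xs.foldl PySem.Set.add s).length ≤ s.length + xs.length := by
  induction xs with
  | nil => intro s; simp
  | cons x xs ih =>
    intro s
    have hadd : (PySem.Set.add s x).length ≤ s.length + 1 := by
      unfold PySem.Set.add; split <;> simp
    simp only [List.foldl_cons]
    have := ih (PySem.Set.add s x)
    simp only [List.length_cons]
    omega

theorem foldl_add_len_eq_iff (xs : List String) : ∀ (s : List String), s.Nodup →
    (((xs.foldl PySem.Set.add s).length = s.length + xs.length) ↔ (s ++ xs).Nodup) := by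
  induction xs with
  | nil => intro s h; simp [h]
  | cons x xs ih =>
    intro s h
    by_cases hm : x ∈ s
    · have hc : PySem.Set.add s x = s := by
        unfold PySem.Set.add; simp [hm]
      have hle := foldl_add_len_le xs s
      constructor
      · intro hlen
        rw [List.foldl_cons, hc] at hlen
        simp only [List.length_cons] at hlen
        omega
      · intro hnd
        exfalso
        rw [List.nodup_append] at hnd
        exact hnd.2.2 x hm x (by simp) rfl
    · have hc : PySem.Set.add s x = s ++ [x] := by
        unfold PySem.Set.add; simp [hm]
      have hnd : (s ++ [x]).Nodup := by
        refine List.Nodup.append h (List.nodup_singleton x) ?_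
        intro a ha hb; simp at hb; subst hb; exact hm ha
      have hiff := ih (s ++ [x]) hnd
      rw [List.foldl_cons, hc]
      constructor
      · intro hlen
        have h2 : (s ++ [x] ++ xs).Nodup := hiff.mp (by
          simp only [List.length_append, List.length_cons, List.length_nil] at hlen ⊢
          omega)
        simpa [List.append_assoc] using h2
      · intro hnd2
        have h2 : (s ++ [x] ++ xs).Nodup := by simpa [List.append_assoc] using hnd2
        have := hiff.mpr h2
        simp only [List.length_append, List.length_cons, List.length_nil] at this ⊢
        omega

theorem ofList_len_eq_iff (xs : List String) :
    ((PySem.Set.ofList xs).length = xs.length) ↔ xs.Nodup := by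
  have := foldl_add_len_eq_iff xs [] List.nodup_nil
  simpa [PySem.Set.ofList, PySem.Set.empty] using this

-- ===== VERDICT (by name: the statement is the Claim_ definition above) =====
theorem smallCaveVisitedMaxOnce_spec : Claim_equal_smallCaveVisitedMaxOnce := by
  intro path _
  unfold Spec_smallCaveVisitedMaxOnce smallCaveVisitedMaxOnce smallCaveVisitedMaxOnce_alt
  rw [goA_eq_nodup path [] List.nodup_nil]
  simp only [List.nil_append]
  have h := ofList_len_eq_iff (path.filter pyStrIslower)
  by_cases hn : (path.filter pyStrIslower).Nodup
  · simp [hn, (h.mpr hn).symm]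
  · have hne : (path.filter pyStrIslower).length ≠ (PySem.Set.ofList (path.filter pyStrIslower)).length :=
      fun he => hn (h.mp he.symm)
    simp [hn, hne]
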